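-- pv_equiv track=rewrite | github.com/marieai/marie-ai | marie/agent/patterns/document_patterns.py | categorize_document_task
-- ===== SOURCE A (Python) =====
-- def categorize_document_task(task: str) -> str:
--     """Categorize a document task based on its description.
--
--     This is a simple heuristic-based categorization. For production use,
--     this should be replaced with an LLM call using DOCUMENT_TOOL_CATEGORIES.
--
--     Args:
--         task: The task description from the user.
--
--     Returns:
--         The category string.
--     """
--     task_lower = task.lower()
--
--     # Keyword-based categorization
--     if any(kw in task_lower for kw in ['table', 'grid', 'row', 'column', 'cell']):
--         return 'table_extraction'
--     elif any(kw in task_lower for kw in ['form', 'field', 'fill', 'checkbox']):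
--         return 'form_extraction'
--     elif any(kw in task_lower for kw in ['invoice', 'receipt', 'bill', 'payment']):
--         return 'invoice_extraction'
--     elif any(
--         kw in task_lower for kw in ['classify', 'type', 'category', 'kind of document']
--     ):
--         return 'classification'
--     elif any(kw in task_lower for kw in ['entity', 'name', 'date', 'amount', 'ner']):
--         return 'ner'
--     elif any(kw in task_lower for kw in ['layout', 'structure', 'region', 'section']):
--         return 'layout_analysis'
--     elif any(
--         kw in task_lower for kw in ['handwrit', 'handwritten', 'cursive', 'script']
--     ):
--         return 'handwriting'
--     elif any(kw in task_lower for kw in ['signature', 'sign', 'autograph']):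
--         return 'signature_detection'
--     elif any(kw in task_lower for kw in ['compare', 'diff', 'difference', 'version']):
--         return 'document_comparison'
--     elif any(kw in task_lower for kw in ['quality', 'blur', 'skew', 'resolution']):
--         return 'quality_assessment'
--     elif any(kw in task_lower for kw in ['multi-page', 'pages', 'pdf', 'document']):
--         return 'multi_page'
--     elif any(
--         kw in task_lower for kw in ['question', 'answer', 'what', 'where', 'who', 'how']
--     ):
--         return 'DocQA'
--     elif any(kw in task_lower for kw in ['text', 'ocr', 'extract', 'read']):
--         return 'OCR'
--     else:
--         return 'general'
-- ===== SOURCE B (Python) =====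
-- # Exhaustive min-priority scan: instead of an ordered if/elif chain with early
-- # return, B scans one flat keyword index (alphabetical, order-irrelevant) and
-- # keeps the lowest-priority match; the chain's priority order lives only in the
-- # priority numbers, not in any control flow or scan order.
-- _KEYWORD_INDEX = [
--     ('amount', 4, 'ner'),
--     ('answer', 11, 'DocQA'),
--     ('autograph', 7, 'signature_detection'),
--     ('bill', 2, 'invoice_extraction'),
--     ('blur', 9, 'quality_assessment'),
--     ('category', 3, 'classification'),
--     ('cell', 0, 'table_extraction'),
--     ('checkbox', 1, 'form_extraction'),
--     ('classify', 3, 'classification'),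
--     ('column', 0, 'table_extraction'),
--     ('compare', 8, 'document_comparison'),
--     ('cursive', 6, 'handwriting'),
--     ('date', 4, 'ner'),
--     ('diff', 8, 'document_comparison'),
--     ('difference', 8, 'document_comparison'),
--     ('document', 10, 'multi_page'),
--     ('entity', 4, 'ner'),
--     ('extract', 12, 'OCR'),
--     ('field', 1, 'form_extraction'),
--     ('fill', 1, 'form_extraction'),
--     ('form', 1, 'form_extraction'),
--     ('grid', 0, 'table_extraction'),
--     ('handwrit', 6, 'handwriting'),
--     ('handwritten', 6, 'handwriting'),
--     ('how', 11, 'DocQA'),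
--     ('invoice', 2, 'invoice_extraction'),
--     ('kind of document', 3, 'classification'),
--     ('layout', 5, 'layout_analysis'),
--     ('multi-page', 10, 'multi_page'),
--     ('name', 4, 'ner'),
--     ('ner', 4, 'ner'),
--     ('ocr', 12, 'OCR'),
--     ('pages', 10, 'multi_page'),
--     ('payment', 2, 'invoice_extraction'),
--     ('pdf', 10, 'multi_page'),
--     ('quality', 9, 'quality_assessment'),
--     ('question', 11, 'DocQA'),
--     ('read', 12, 'OCR'),
--     ('receipt', 2, 'invoice_extraction'),
--     ('region', 5, 'layout_analysis'),
--     ('resolution', 9, 'quality_assessment'),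
--     ('row', 0, 'table_extraction'),
--     ('script', 6, 'handwriting'),
--     ('section', 5, 'layout_analysis'),
--     ('sign', 7, 'signature_detection'),
--     ('signature', 7, 'signature_detection'),
--     ('skew', 9, 'quality_assessment'),
--     ('structure', 5, 'layout_analysis'),
--     ('table', 0, 'table_extraction'),
--     ('text', 12, 'OCR'),
--     ('type', 3, 'classification'),
--     ('version', 8, 'document_comparison'),
--     ('what', 11, 'DocQA'),
--     ('where', 11, 'DocQA'),
--     ('who', 11, 'DocQA'),
-- ]
--
--
-- def categorize_document_task(task: str) -> str:
--     t = task.lower()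
--     best = None  # (priority, category) of the best match seen so far
--     for kw, prio, cat in _KEYWORD_INDEX:
--         if kw in t and (best is None or prio < best[0]):
--             best = (prio, cat)
--     return 'general' if best is None else best[1]
-- ===== Notes on version B (the rewrite author's own statement) =====
-- stated objective: alternative
-- what changed: Replaced the first-match if/elif chain over ordered keyword groups by an exhaustive single pass over a flat alphabetically-sorted (keyword, priority, category) index that keeps the minimum-priority match in an accumulator; the chain's priority order survives only as priority numbers, not as control flow or scan order.
import Mathlib
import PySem

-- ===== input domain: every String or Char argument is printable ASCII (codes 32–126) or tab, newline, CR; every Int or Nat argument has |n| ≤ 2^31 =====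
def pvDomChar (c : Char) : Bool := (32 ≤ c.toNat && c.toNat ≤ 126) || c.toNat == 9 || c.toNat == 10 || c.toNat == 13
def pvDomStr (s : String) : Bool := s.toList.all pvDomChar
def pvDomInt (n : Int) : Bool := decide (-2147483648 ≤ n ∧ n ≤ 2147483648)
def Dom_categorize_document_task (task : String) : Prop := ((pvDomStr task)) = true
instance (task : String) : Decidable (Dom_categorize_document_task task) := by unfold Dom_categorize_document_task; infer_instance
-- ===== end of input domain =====

-- B replaces A's first-match if/elif chain by an exhaustive scan of a flat alphabetical
-- keyword index keeping the minimum-priority match; objective: alternative (same cost).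

-- ===== PORT A =====
def categorize_document_task (task : String) : String :=
  let task_lower := PySem.Str.lower task
  if ["table", "grid", "row", "column", "cell"].any (fun kw => PySem.Str.isIn kw task_lower) then
    "table_extraction"
  else if ["form", "field", "fill", "checkbox"].any (fun kw => PySem.Str.isIn kw task_lower) then
    "form_extraction"
  else if ["invoice", "receipt", "bill", "payment"].any (fun kw => PySem.Str.isIn kw task_lower) then
    "invoice_extraction"
  else if ["classify", "type", "category", "kind of document"].any (fun kw => PySem.Str.isIn kw task_lower) then
    "classification"
  else if ["entity", "name", "date", "amount", "ner"].any (fun kw => PySem.Str.isIn kw task_lower) then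
    "ner"
  else if ["layout", "structure", "region", "section"].any (fun kw => PySem.Str.isIn kw task_lower) then
    "layout_analysis"
  else if ["handwrit", "handwritten", "cursive", "script"].any (fun kw => PySem.Str.isIn kw task_lower) then
    "handwriting"
  else if ["signature", "sign", "autograph"].any (fun kw => PySem.Str.isIn kw task_lower) then
    "signature_detection"
  else if ["compare", "diff", "difference", "version"].any (fun kw => PySem.Str.isIn kw task_lower) then
    "document_comparison"
  else if ["quality", "blur", "skew", "resolution"].any (fun kw => PySem.Str.isIn kw task_lower) then
    "quality_assessment"
  else if ["multi-page", "pages", "pdf", "document"].any (fun kw => PySem.Str.isIn kw task_lower) then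
    "multi_page"
  else if ["question", "answer", "what", "where", "who", "how"].any (fun kw => PySem.Str.isIn kw task_lower) then
    "DocQA"
  else if ["text", "ocr", "extract", "read"].any (fun kw => PySem.Str.isIn kw task_lower) then
    "OCR"
  else
    "general"

-- ===== PORT B =====
-- the flat alphabetical keyword index of Source B: (keyword, priority, category)
def bKeywords : List (String × Nat × String) :=
  [ ("amount", 4, "ner"),
    ("answer", 11, "DocQA"),
    ("autograph", 7, "signature_detection"),
    ("bill", 2, "invoice_extraction"),
    ("blur", 9, "quality_assessment"),
    ("category", 3, "classification"),
    ("cell", 0, "table_extraction"),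
    ("checkbox", 1, "form_extraction"),
    ("classify", 3, "classification"),
    ("column", 0, "table_extraction"),
    ("compare", 8, "document_comparison"),
    ("cursive", 6, "handwriting"),
    ("date", 4, "ner"),
    ("diff", 8, "document_comparison"),
    ("difference", 8, "document_comparison"),
    ("document", 10, "multi_page"),
    ("entity", 4, "ner"),
    ("extract", 12, "OCR"),
    ("field", 1, "form_extraction"),
    ("fill", 1, "form_extraction"),
    ("form", 1, "form_extraction"),
    ("grid", 0, "table_extraction"),
    ("handwrit", 6, "handwriting"),
    ("handwritten", 6, "handwriting"),
    ("how", 11, "DocQA"),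
    ("invoice", 2, "invoice_extraction"),
    ("kind of document", 3, "classification"),
    ("layout", 5, "layout_analysis"),
    ("multi-page", 10, "multi_page"),
    ("name", 4, "ner"),
    ("ner", 4, "ner"),
    ("ocr", 12, "OCR"),
    ("pages", 10, "multi_page"),
    ("payment", 2, "invoice_extraction"),
    ("pdf", 10, "multi_page"),
    ("quality", 9, "quality_assessment"),
    ("question", 11, "DocQA"),
    ("read", 12, "OCR"),
    ("receipt", 2, "invoice_extraction"),
    ("region", 5, "layout_analysis"),
    ("resolution", 9, "quality_assessment"),
    ("row", 0, "table_extraction"),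
    ("script", 6, "handwriting"),
    ("section", 5, "layout_analysis"),
    ("sign", 7, "signature_detection"),
    ("signature", 7, "signature_detection"),
    ("skew", 9, "quality_assessment"),
    ("structure", 5, "layout_analysis"),
    ("table", 0, "table_extraction"),
    ("text", 12, "OCR"),
    ("type", 3, "classification"),
    ("version", 8, "document_comparison"),
    ("what", 11, "DocQA"),
    ("where", 11, "DocQA"),
    ("who", 11, "DocQA") ]

-- the loop body of Source B: keep the lowest-priority matching keyword seen so far
def bStep (t : String) (best : Option (Nat × String)) (e : String × Nat × String) :
    Option (Nat × String) :=
  if PySem.Str.isIn e.1 t &&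
      (match best with | none => true | some (i, _) => decide (e.2.1 < i)) then
    some (e.2.1, e.2.2)
  else best

def categorize_document_task_alt (task : String) : String :=
  let t := PySem.Str.lower task
  match bKeywords.foldl (bStep t) none with
  | none => "general"
  | some (_, cat) => cat

-- ===== PRECONDITION & SPEC =====
def Spec_categorize_document_task (task : String) (out : String) : Prop := out = categorize_document_task_alt task
instance (task : String) (out : String) : Decidable (Spec_categorize_document_task task out) := by unfold Spec_categorize_document_task; infer_instance

-- ===== CLAIM =====
def Claim_equal_categorize_document_task : Prop := ∀ (task : String), Dom_categorize_document_task task → Spec_categorize_document_task task (categorize_document_task task)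

-- ===== LEMMAS AND PROOFS =====

-- A's chain as first-match over its ordered groups
def catGroups : List (List String × String) :=
  [ (["table", "grid", "row", "column", "cell"], "table_extraction"),
    (["form", "field", "fill", "checkbox"], "form_extraction"),
    (["invoice", "receipt", "bill", "payment"], "invoice_extraction"),
    (["classify", "type", "category", "kind of document"], "classification"),
    (["entity", "name", "date", "amount", "ner"], "ner"),
    (["layout", "structure", "region", "section"], "layout_analysis"),
    (["handwrit", "handwritten", "cursive", "script"], "handwriting"),
    (["signature", "sign", "autograph"], "signature_detection"),
    (["compare", "diff", "difference", "version"], "document_comparison"),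
    (["quality", "blur", "skew", "resolution"], "quality_assessment"),
    (["multi-page", "pages", "pdf", "document"], "multi_page"),
    (["question", "answer", "what", "where", "who", "how"], "DocQA"),
    (["text", "ocr", "extract", "read"], "OCR") ]

def chainSpec (t : String) : List (List String × String) → String
  | [] => "general"
  | (kws, cat) :: rest =>
      if kws.any (fun kw => PySem.Str.isIn kw t) then cat else chainSpec t rest

def taggedFrom (k : Nat) : List (List String × String) → List (String × Nat × String)
  | [] => []
  | (kws, cat) :: rest => kws.map (fun kw => (kw, k, cat)) ++ taggedFrom (k + 1) rest

def extract : Option (Nat × String) → String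
  | none => "general"
  | some (_, cat) => cat

theorem A_eq_chain (task : String) :
    categorize_document_task task = chainSpec (PySem.Str.lower task) catGroups := rfl

theorem bStep_not_in (t kw : String) (p : Nat) (c : String) (z : Option (Nat × String))
    (h : PySem.Str.isIn kw t = false) : bStep t z (kw, p, c) = z := by
  simp only [bStep, h, Bool.false_and]
  rw [if_neg Bool.false_ne_true]

theorem bStep_in_none (t kw : String) (p : Nat) (c : String)
    (h : PySem.Str.isIn kw t = true) : bStep t none (kw, p, c) = some (p, c) := by
  simp only [bStep, h, Bool.true_and]
  simp

theorem bStep_in_some (t kw : String) (p : Nat) (c : String) (i : Nat) (c' : String)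
    (h : PySem.Str.isIn kw t = true) :
    bStep t (some (i, c')) (kw, p, c) = if p < i then some (p, c) else some (i, c') := by
  simp only [bStep, h, Bool.true_and]
  rcases Nat.lt_or_ge p i with hp | hp
  · rw [if_pos (by simp [hp]), if_pos hp]
  · rw [if_neg (by simp; omega), if_neg (by omega)]

theorem groupFold_some (t : String) (kws : List String) (k : Nat) (cat : String)
    (i : Nat) (c : String) (h : i ≤ k) :
    List.foldl (bStep t) (some (i, c)) (kws.map (fun kw => (kw, k, cat))) = some (i, c) := by
  induction kws with
  | nil => rfl
  | cons kw rest ih =>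
      simp only [List.map_cons, List.foldl_cons]
      have hk : ¬ (k < i) := by omega
      simp only [bStep, hk, decide_false, Bool.and_false]
      exact ih

theorem groupFold_none (t : String) (kws : List String) (k : Nat) (cat : String) :
    List.foldl (bStep t) none (kws.map (fun kw => (kw, k, cat))) =
      if kws.any (fun kw => PySem.Str.isIn kw t) then some (k, cat) else none := by
  induction kws with
  | nil => rfl
  | cons kw rest ih =>
      rcases (PySem.Str.isIn kw t).eq_false_or_eq_true with hkw | hkw
      · rw [List.map_cons, List.foldl_cons, bStep_in_none t kw k cat hkw,
            groupFold_some t rest k cat k cat (le_refl k)]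
        simp only [PySem.Str.isIn_eq] at hkw
        simp [List.any_cons, hkw]
      · rw [List.map_cons, List.foldl_cons, bStep_not_in t kw k cat none hkw, ih]
        simp only [PySem.Str.isIn_eq] at hkw
        simp [List.any_cons, hkw]

theorem keepSome (t : String) (groups : List (List String × String)) :
    ∀ (k i : Nat) (c : String), i ≤ k →
      List.foldl (bStep t) (some (i, c)) (taggedFrom k groups) = some (i, c) := by
  induction groups with
  | nil => intro k i c _; rfl
  | cons g rest ih =>
      intro k i c h
      obtain ⟨kws, cat⟩ := g
      simp only [taggedFrom, List.foldl_append]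
      rw [groupFold_some t kws k cat i c h]
      exact ih (k + 1) i c (by omega)

theorem fold_eq_chain (t : String) (groups : List (List String × String)) :
    ∀ k : Nat, extract (List.foldl (bStep t) none (taggedFrom k groups)) = chainSpec t groups := by
  induction groups with
  | nil => intro k; rfl
  | cons g rest ih =>
      intro k
      obtain ⟨kws, cat⟩ := g
      simp only [taggedFrom, List.foldl_append, chainSpec]
      rw [groupFold_none t kws k cat]
      rcases (kws.any (fun kw => PySem.Str.isIn kw t)).eq_false_or_eq_true with hany | hany
      · rw [hany, if_pos rfl, if_pos rfl, keepSome t rest (k + 1) k cat (by omega)]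
        rfl
      · rw [hany, if_neg Bool.false_ne_true, if_neg Bool.false_ne_true]
        exact ih (k + 1)

-- commutativity of the min-accumulator step for priority-coherent entries
theorem bStep_comm (t : String) (x y : String × Nat × String)
    (hc : x.2.1 = y.2.1 → x.2.2 = y.2.2) (z : Option (Nat × String)) :
    bStep t (bStep t z x) y = bStep t (bStep t z y) x := by
  obtain ⟨kx, px, cx⟩ := x
  obtain ⟨ky, py, cy⟩ := y
  simp only at hc
  rcases (PySem.Str.isIn kx t).eq_false_or_eq_true with hx | hx
  swap
  · rw [bStep_not_in t kx px cx _ hx, bStep_not_in t kx px cx _ hx]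
  rcases (PySem.Str.isIn ky t).eq_false_or_eq_true with hy | hy
  swap
  · rw [bStep_not_in t ky py cy _ hy, bStep_not_in t ky py cy _ hy]
  rcases z with _ | ⟨i, c⟩
  · rw [bStep_in_none t kx px cx hx, bStep_in_none t ky py cy hy,
        bStep_in_some t ky py cy px cx hy, bStep_in_some t kx px cx py cy hx]
    split_ifs <;>
      first
        | rfl
        | omega
        | (have hp : px = py := by omega
           rw [hp, hc hp])
  · rw [bStep_in_some t kx px cx i c hx, bStep_in_some t ky py cy i c hy]
    split_ifs <;>
      rw [bStep_in_some t ky py cy _ _ hy, bStep_in_some t kx px cx _ _ hx] <;>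
        split_ifs <;>
          first
            | rfl
            | omega
            | (have hp : px = py := by omega
               rw [hp, hc hp])

theorem bKeywords_perm : bKeywords.Perm (taggedFrom 0 catGroups) := by decide

theorem bKeywords_coherent :
    ∀ x ∈ bKeywords, ∀ y ∈ bKeywords, x.2.1 = y.2.1 → x.2.2 = y.2.2 := by decide

-- ===== VERDICT =====
theorem categorize_document_task_spec : Claim_equal_categorize_document_task := by
  intro task _
  unfold Spec_categorize_document_task categorize_document_task_alt
  rw [A_eq_chain task]
  have hperm := bKeywords_perm.foldl_eq'
    (fun x hx y hy z => bStep_comm (PySem.Str.lower task) x y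
      (bKeywords_coherent x hx y hy) z) none
  show chainSpec (PySem.Str.lower task) catGroups =
    extract (bKeywords.foldl (bStep (PySem.Str.lower task)) none)
  rw [hperm, fold_eq_chain (PySem.Str.lower task) catGroups 0]
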